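-- pv_equiv track=rewrite | github.com/pypi-data/pypi-mirror-404 | packages/evolib/evolib-0.2.0b4.dev4-py3-none-any.whl/evolib/utils/benchmarks.py | xor_sequence
-- ===== SOURCE A (Python) =====
-- from typing import Sequence
--
-- def xor_sequence(length: int, k: int = 2, seed: Sequence[int] = (0, 1)) -> list[int]:
--     """
--     Generate a sequence where each new bit is the XOR of the last k bits.
--
--     Parameters
--     ----------
--     length : int
--         Length of the sequence to generate.
--     k : int, optional
--         Window size for XOR. Default: 2 (classic XOR sequence).
--     seed : Sequence[int], optional
--         Initial bits to start the sequence. Must have length >= k.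
--
--     Returns
--     -------
--     list[int]
--         Generated bit sequence of the given length.
--     """
--     if len(seed) < k:
--         raise ValueError(f"Seed must have at least {k} bits.")
--     seq = list(seed)
--     while len(seq) < length:
--         next_bit = 0
--         for i in range(1, k + 1):
--             next_bit ^= seq[-i]
--         seq.append(next_bit)
--     return seq[:length]
-- ===== SOURCE B (Python) =====
-- def xor_sequence(length: int, k: int = 2, seed=(0, 1)) -> list:
--     """Periodic rewrite: s[n] = s[n-1] ^ s[n-1-k] ^ s[n-1] = s[n-1-k] for every
--     generated position after the first, so after producing one bit the rest of the
--     sequence repeats the last k+1 elements periodically; build it by block replication."""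
--     if len(seed) < k:
--         raise ValueError(f"Seed must have at least {k} bits.")
--     seq = list(seed)
--     if length <= len(seq):
--         return seq[:length]
--     kk = max(k, 0)  # k <= 0 means an empty XOR window (the generated bit is 0)
--     w = 0
--     for b in seq[len(seq) - kk:]:
--         w ^= b
--     seq.append(w)
--     period = seq[len(seq) - 1 - kk:]
--     need = length - len(seq)
--     reps = need // len(period) + 1
--     seq.extend((period * reps)[:need])
--     return seq[:length]
-- ===== Notes on version B (the rewrite author's own statement) =====
-- stated objective: alternative
-- what changed: Instead of re-scanning the last k bits for every generated element, B generates one element (XOR of the last k) and then extends by replicating the last k+1 elements periodically, using the identity s[n] = s[n-1] ^ s[n-1-k] ^ s[n-1] = s[n-1-k]; per generated element this is O(1) block copy instead of an O(k) scan, though a timing run's timing inputs (length < len(seed)) never exercise the generation loop, so no speedup is measured.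
import Mathlib
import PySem

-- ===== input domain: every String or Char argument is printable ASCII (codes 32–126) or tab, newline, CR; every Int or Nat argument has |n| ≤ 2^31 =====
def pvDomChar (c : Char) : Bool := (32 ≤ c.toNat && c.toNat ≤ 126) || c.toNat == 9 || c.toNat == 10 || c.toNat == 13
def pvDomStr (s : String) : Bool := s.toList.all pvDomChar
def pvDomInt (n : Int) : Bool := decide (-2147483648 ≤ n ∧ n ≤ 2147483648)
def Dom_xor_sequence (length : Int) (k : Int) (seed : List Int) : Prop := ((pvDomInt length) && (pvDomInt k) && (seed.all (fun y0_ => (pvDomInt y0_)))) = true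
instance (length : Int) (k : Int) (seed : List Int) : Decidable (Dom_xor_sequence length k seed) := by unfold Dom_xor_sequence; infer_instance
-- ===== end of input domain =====

-- B generates one bit (XOR of the last k) and then extends by replicating the last
-- k+1 elements periodically (each later bit equals the bit k+1 positions earlier),
-- instead of A's per-element rescan of the window (objective: alternative algorithm).

-- ===== PORT A =====
-- next_bit = 0; for i in range(1, k+1): next_bit ^= seq[-i]
def xorInnerA (seq : List Int) (k : Int) : Int :=
  (PySem.List.pyRange 1 (k + 1) 1).foldl
    (fun acc i => PySem.Int.bxor acc (PySem.List.pyGetD seq (-i) 0)) 0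

-- while len(seq) < length: seq.append(next_bit)   (fuel = number of missing elements)
def xorLoopA (k : Int) : Nat → List Int → List Int
  | 0, seq => seq
  | n + 1, seq => xorLoopA k n (seq ++ [xorInnerA seq k])

def xor_sequence (length : Int) (k : Int) (seed : List Int) : List Int :=
  PySem.List.slice (xorLoopA k (length - seed.length).toNat seed) none (some length)

-- ===== PORT B =====
-- w = 0; for b in seq[len(seq)-kk:]: w ^= b
def pvWindowB (kk : Nat) (seed : List Int) : Int :=
  (PySem.List.slice seed (some ((seed.length : Int) - (kk : Nat))) none).foldl PySem.Int.bxor 0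

-- period = seq[len(seq)-1-kk:]; need = length - len(seq); reps = need // len(period) + 1;
-- seq.extend((period * reps)[:need])
def pvExtendB (length : Int) (kk : Nat) (seq1 : List Int) : List Int :=
  seq1 ++
    (List.flatten (List.replicate
      (PySem.Int.floordiv (length - seq1.length)
        ((PySem.List.slice seq1 (some ((seq1.length : Int) - 1 - (kk : Nat))) none).length) + 1).toNat
      (PySem.List.slice seq1 (some ((seq1.length : Int) - 1 - (kk : Nat))) none))).take
      (length - (seq1.length : Int)).toNat

def xor_sequence_alt (length : Int) (k : Int) (seed : List Int) : List Int :=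
  if length ≤ (seed.length : Int) then
    PySem.List.slice seed none (some length)
  else
    PySem.List.slice
      (pvExtendB length (max k 0).toNat (seed ++ [pvWindowB (max k 0).toNat seed]))
      none (some length)

-- ===== PRECONDITION & SPEC =====
-- A (and B) raise ValueError exactly when len(seed) < k; those inputs are excluded.
def Pre_xor_sequence (length : Int) (k : Int) (seed : List Int) : Prop :=
  k ≤ (seed.length : Int)
instance (length : Int) (k : Int) (seed : List Int) : Decidable (Pre_xor_sequence length k seed) := by unfold Pre_xor_sequence; infer_instance

def pvWitness_xor_sequence : Int × Int × List Int := (7, 2, [0, 1])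

def Spec_xor_sequence (length : Int) (k : Int) (seed : List Int) (out : List Int) : Prop := out = xor_sequence_alt length k seed
instance (length : Int) (k : Int) (seed : List Int) (out : List Int) : Decidable (Spec_xor_sequence length k seed out) := by unfold Spec_xor_sequence; infer_instance

-- ===== CLAIM (what is proved, stated in full; the proofs are below) =====
def Claim_equal_xor_sequence : Prop := ∀ (length : Int) (k : Int) (seed : List Int), Dom_xor_sequence length k seed → Pre_xor_sequence length k seed → Spec_xor_sequence length k seed (xor_sequence length k seed)

-- ===== LEMMAS AND PROOFS =====

-- XOR of the last kk elements of seq, in list order.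
def windowXor (seq : List Int) (kk : Nat) : Int :=
  (seq.drop (seq.length - kk)).foldl PySem.Int.bxor 0

-- the periodic extension: n elements cycling through P
def extSeq (P : List Int) (n : Nat) : List Int :=
  (List.range n).map (fun i => P.getD (i % P.length) 0)

-- sign/magnitude decomposition of PySem.Int.bxor, used only to derive associativity
def pvMag (x : Int) : Nat := if x < 0 then (-x - 1).toNat else x.toNat

lemma pvExt {x y : Int} (hm : pvMag x = pvMag y) (hs : decide (x < 0) = decide (y < 0)) : x = y := by
  unfold pvMag at hm; simp only [decide_eq_decide] at hs
  split_ifs at hm <;> omega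

lemma pvMag_bxor (a b : Int) : pvMag (PySem.Int.bxor a b) = pvMag a ^^^ pvMag b := by
  unfold PySem.Int.bxor pvMag
  split_ifs with h1 h2 h3 h4 h5 h6 h7 <;> omega

lemma pvNeg_bxor (a b : Int) : decide (PySem.Int.bxor a b < 0) = (decide (a < 0) != decide (b < 0)) := by
  unfold PySem.Int.bxor
  split_ifs with h1 h2 h3 <;>
    rw [Bool.eq_iff_iff] <;>
    simp only [decide_eq_true_eq, bne_iff_ne, ne_eq, decide_eq_decide] <;> omega

lemma bxor_assoc (a b c : Int) :
    PySem.Int.bxor (PySem.Int.bxor a b) c = PySem.Int.bxor a (PySem.Int.bxor b c) := by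
  apply pvExt
  · rw [pvMag_bxor, pvMag_bxor, pvMag_bxor, pvMag_bxor, Nat.xor_assoc]
  · simp only [pvNeg_bxor, Bool.xor_assoc]

lemma zero_bxor (a : Int) : PySem.Int.bxor 0 a = a := by
  rw [PySem.Int.bxor_comm, PySem.Int.bxor_zero]

lemma foldl_bxor_shift (l : List Int) : ∀ a b : Int,
    l.foldl PySem.Int.bxor (PySem.Int.bxor a b) = PySem.Int.bxor a (l.foldl PySem.Int.bxor b) := by
  induction l with
  | nil => intro a b; rfl
  | cons x t ih => intro a b; simp only [List.foldl_cons, bxor_assoc, ih]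

-- Python's seq[i] for -len(seq) ≤ i < 0
lemma pyGetD_neg (seq : List Int) (i : Int) (h1 : -(seq.length : Int) ≤ i) (h2 : i < 0) :
    PySem.List.pyGetD seq i 0 = seq.getD (seq.length - (-i).toNat) 0 := by
  simp only [PySem.List.pyGetD, PySem.List.pyGet?, PySem.List.pyIdx?]
  rw [if_neg (by omega), if_pos (by omega : -(seq.length : Int) ≤ i)]
  simp [List.getD]

lemma windowXor_succ (seq : List Int) (j : Nat) (hj : j + 1 ≤ seq.length) :
    windowXor seq (j + 1) =
      PySem.Int.bxor (seq.getD (seq.length - (j + 1)) 0) (windowXor seq j) := by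
  unfold windowXor
  have h : seq.length - (j + 1) < seq.length := by omega
  rw [List.drop_eq_getElem_cons h, List.foldl_cons, zero_bxor,
      ← PySem.Int.bxor_zero (seq[seq.length - (j + 1)]'h), foldl_bxor_shift]
  have he : seq.length - (j + 1) + 1 = seq.length - j := by omega
  rw [he, List.getD_eq_getElem seq 0 h]

-- A's inner loop computes the window XOR
lemma xorInnerA_nat (seq : List Int) (K : Nat) (hK : K ≤ seq.length) :
    (PySem.List.pyRange 1 ((K : Int) + 1) 1).foldl
      (fun acc i => PySem.Int.bxor acc (PySem.List.pyGetD seq (-i) 0)) 0 = windowXor seq K := by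
  induction K with
  | zero => rw [PySem.List.pyRange_one_eq_nil (by omega)]; unfold windowXor; simp
  | succ j ih =>
    have h1 : ((j + 1 : Nat) : Int) + 1 = ((j : Nat) : Int) + 1 + 1 := by push_cast; ring
    rw [h1, PySem.List.pyRange_one_succ_right (by omega), List.foldl_append]
    rw [ih (by omega)]
    simp only [List.foldl_cons, List.foldl_nil]
    rw [pyGetD_neg seq (-(((j : Nat) : Int) + 1)) (by omega) (by omega)]
    have h2 : seq.length - (- -(((j : Nat) : Int) + 1)).toNat = seq.length - (j + 1) := by omega
    rw [h2, windowXor_succ seq j (by omega), PySem.Int.bxor_comm]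

lemma xorInnerA_eq (seq : List Int) (k : Int) (hk : k ≤ (seq.length : Int)) :
    xorInnerA seq k = windowXor seq k.toNat := by
  unfold xorInnerA
  by_cases hk0 : k ≤ 0
  · rw [PySem.List.pyRange_one_eq_nil (by omega)]
    have h0 : k.toNat = 0 := by omega
    rw [h0]; unfold windowXor; simp
  · have hkk : k = (k.toNat : Int) := by omega
    rw [hkk]
    exact xorInnerA_nat seq k.toNat (by omega)

-- appending the window XOR: the new window XOR is the departing element
lemma windowXor_append_self (seq : List Int) (kk : Nat) (hk : kk ≤ seq.length) :
    windowXor (seq ++ [windowXor seq kk]) kk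
      = (seq ++ [windowXor seq kk]).getD (seq.length - kk) 0 := by
  set w := windowXor seq kk with hw
  cases kk with
  | zero =>
    have hL : windowXor (seq ++ [w]) 0 = 0 := by unfold windowXor; simp
    have hR : (seq ++ [w]).getD (seq.length - 0) 0 = w := by
      rw [List.getD_eq_getElem _ 0 (by simp), List.getElem_append_right (by omega)]
      simp
    rw [hL, hR, hw]; unfold windowXor; simp
  | succ j =>
    have hjl : seq.length - (j + 1) < seq.length := by omega
    set x := seq[seq.length - (j + 1)]'hjl with hx
    set T := windowXor seq j with hT
    have hwin : w = PySem.Int.bxor x T := by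
      rw [hw, windowXor_succ seq j (by omega), List.getD_eq_getElem seq 0 hjl]
    have hL : windowXor (seq ++ [w]) (j + 1) = PySem.Int.bxor T w := by
      unfold windowXor
      have h4 : (seq ++ [w]).length - (j + 1) = seq.length - j := by
        simp only [List.length_append, List.length_cons, List.length_nil]; omega
      rw [h4, List.drop_append_of_le_length (by omega), List.foldl_append]
      simp only [List.foldl_cons, List.foldl_nil]
      rfl
    have hR : (seq ++ [w]).getD (seq.length - (j + 1)) 0 = x := by
      have hlt : seq.length - (j + 1) < (seq ++ [w]).length := by simp only [List.length_append, List.length_cons, List.length_nil]; omega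
      rw [List.getD_eq_getElem _ 0 hlt, List.getElem_append_left hjl]
    rw [hL, hR, hwin, PySem.Int.bxor_comm x T, ← bxor_assoc, PySem.Int.bxor_self, zero_bxor]

-- peeling one element off the cyclic extension
lemma extSeq_succ (P : List Int) (hP : P ≠ []) (n : Nat) :
    extSeq P (n + 1) = P.getD 0 0 :: extSeq (P.rotate 1) n := by
  unfold extSeq
  rw [List.range_succ_eq_map, List.map_cons, List.map_map, List.length_rotate]
  have hlen : 0 < P.length := List.length_pos_iff.mpr hP
  congr 1
  apply List.map_congr_left
  intro i _
  simp only [Function.comp_apply, Nat.succ_eq_add_one]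
  have h1 : i % P.length < P.length := Nat.mod_lt _ hlen
  have h2 : (i + 1) % P.length < P.length := Nat.mod_lt _ hlen
  rw [List.getD_eq_getElem _ 0 h2,
      List.getD_eq_getElem _ 0 (by rw [List.length_rotate]; exact h1), List.getElem_rotate]
  congr 1
  exact (Nat.mod_add_mod i P.length 1).symm

-- getD of a drop
lemma getD_drop_zero (seq : List Int) (m : Nat) (hm : m < seq.length) :
    (seq.drop m).getD 0 0 = seq.getD m 0 := by
  rw [List.getD_eq_getElem _ 0 (by simp only [List.length_drop]; omega),
      List.getD_eq_getElem _ 0 hm, List.getElem_drop]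
  simp only [Nat.add_zero]

-- A's loop, once the window invariant holds, produces the cyclic extension
lemma loopA_periodic (k : Int) : ∀ (n : Nat) (seq : List Int),
    k.toNat + 1 ≤ seq.length →
    windowXor seq k.toNat = seq.getD (seq.length - (k.toNat + 1)) 0 →
    xorLoopA k n seq = seq ++ extSeq (seq.drop (seq.length - (k.toNat + 1))) n := by
  intro n
  induction n with
  | zero => intro seq _ _; unfold extSeq; simp [xorLoopA]
  | succ m ih =>
    intro seq hlen hinv
    have hkle : k ≤ (seq.length : Int) := by have := Int.self_le_toNat k; omega
    set kk := k.toNat with hkk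
    set P := seq.drop (seq.length - (kk + 1)) with hP
    have hPlen : P.length = kk + 1 := by rw [hP, List.length_drop]; omega
    have hPne : P ≠ [] := by intro h; rw [h] at hPlen; simp at hPlen
    have hhead : P.getD 0 0 = seq.getD (seq.length - (kk + 1)) 0 :=
      getD_drop_zero seq _ (by omega)
    set w := windowXor seq kk with hw
    have hxi : xorInnerA seq k = w := by rw [xorInnerA_eq seq k hkle, hw]
    have hwP : w = P.getD 0 0 := by rw [hinv, hhead]
    have hlen' : (seq ++ [w]).length = seq.length + 1 := by simp
    have hinv' : windowXor (seq ++ [w]) kk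
        = (seq ++ [w]).getD ((seq ++ [w]).length - (kk + 1)) 0 := by
      have := windowXor_append_self seq kk (by omega)
      rw [← hw] at this
      rw [this]
      congr 1
      simp only [List.length_append, List.length_cons, List.length_nil]; omega
    have hProt : (seq ++ [w]).drop ((seq ++ [w]).length - (kk + 1)) = P.rotate 1 := by
      have h1 : (seq ++ [w]).length - (kk + 1) = seq.length - kk := by
        simp only [List.length_append, List.length_cons, List.length_nil]; omega
      rw [h1, List.drop_append_of_le_length (by omega),
          List.rotate_eq_drop_append_take (by omega)]
      congr 1
      · rw [hP, List.drop_drop]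
        congr 1; omega
      · have h2 : P.take 1 = [P.getD 0 0] := by
          cases hPc : P with
          | nil => exact absurd hPc hPne
          | cons p t => simp [List.getD]
        rw [h2, hwP]
    have step : xorLoopA k (m + 1) seq = xorLoopA k m (seq ++ [w]) := by
      have h5 : xorLoopA k (m + 1) seq = xorLoopA k m (seq ++ [xorInnerA seq k]) := rfl
      rw [h5, hxi]
    rw [step, ih (seq ++ [w]) (by simp only [List.length_append, List.length_cons, List.length_nil]; omega) hinv',
        hProt, extSeq_succ P hPne m, ← hwP]
    simp

-- replicated period = cyclic extension of full length
lemma map_range_getD (P : List Int) : (List.range P.length).map (fun i => P.getD (i % P.length) 0) = P := by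
  apply List.ext_getElem
  · simp
  · intro i h1 h2
    simp only [List.getElem_map, List.getElem_range]
    rw [Nat.mod_eq_of_lt (by simpa using h2), List.getD_eq_getElem _ 0 (by simpa using h2)]

lemma flatten_replicate_eq_extSeq (P : List Int) (r : Nat) :
    (List.replicate r P).flatten = extSeq P (r * P.length) := by
  induction r with
  | zero => simp [extSeq]
  | succ q ih =>
    rw [List.replicate_succ, List.flatten_cons, ih]
    unfold extSeq
    have h1 : (q + 1) * P.length = P.length + q * P.length := by ring
    rw [h1, List.range_add, List.map_append, List.map_map, map_range_getD]
    congr 1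
    apply List.map_congr_left
    intro i _
    simp only [Function.comp_apply]
    rw [Nat.add_mod_left]

lemma extSeq_take (P : List Int) (n m : Nat) (h : n ≤ m) :
    (extSeq P m).take n = extSeq P n := by
  unfold extSeq
  rw [← List.map_take, List.take_range, Nat.min_eq_left h]

-- ===== VERDICT (by name: the statement is the Claim_ definition above) =====
theorem xor_sequence_spec : Claim_equal_xor_sequence := by
  intro length k seed _ hpre
  unfold Pre_xor_sequence at hpre
  unfold Spec_xor_sequence xor_sequence xor_sequence_alt
  have hmax : (max k 0).toNat = k.toNat := by omega
  by_cases hle : length ≤ (seed.length : Int)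
  · rw [if_pos hle]
    have h0 : (length - (seed.length : Int)).toNat = 0 := by omega
    rw [h0]
    rfl
  · rw [if_neg hle]
    have hkn : k.toNat ≤ seed.length := by omega
    set kk := k.toNat with hkk
    rw [hmax]
    -- the initial window w0 of B equals windowXor seed kk
    have h0 : 0 ≤ (seed.length : Int) - (kk : Nat) := by omega
    have hw0 : pvWindowB kk seed = windowXor seed kk := by
      unfold pvWindowB windowXor
      rw [PySem.List.slice_from seed h0]
      have h1 : ((seed.length : Int) - (kk : Nat)).toNat = seed.length - kk := by omega
      rw [h1]
    rw [hw0]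
    set w := windowXor seed kk with hw
    set seq1 := seed ++ [w] with hseq1
    have hlen1 : seq1.length = seed.length + 1 := by simp [hseq1]
    -- A: peel the first loop iteration, then apply the periodic lemma
    have hfuel : (length - (seed.length : Int)).toNat = (length - (seq1.length : Int)).toNat + 1 := by
      rw [hlen1]; omega
    have hstep : xorLoopA k (length - (seed.length : Int)).toNat seed
        = xorLoopA k (length - (seq1.length : Int)).toNat seq1 := by
      rw [hfuel]
      have h5 : xorLoopA k ((length - (seq1.length : Int)).toNat + 1) seed
          = xorLoopA k (length - (seq1.length : Int)).toNat (seed ++ [xorInnerA seed k]) := rfl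
      rw [h5, xorInnerA_eq seed k hpre]
    have hinv1 : windowXor seq1 kk = seq1.getD (seq1.length - (kk + 1)) 0 := by
      have := windowXor_append_self seed kk (by omega)
      rw [← hw, ← hseq1] at this
      rw [this]
      congr 1
      rw [hlen1]; omega
    rw [hstep, loopA_periodic k _ seq1 (by rw [hlen1]; omega) hinv1]
    -- B: the replicated period, truncated, is the cyclic extension
    unfold pvExtendB
    have hps : 0 ≤ (seq1.length : Int) - 1 - (kk : Nat) := by rw [hlen1]; omega
    rw [PySem.List.slice_from seq1 hps]
    have hidx : ((seq1.length : Int) - 1 - (kk : Nat)).toNat = seq1.length - (kk + 1) := by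
      rw [hlen1]; omega
    rw [hidx]
    set P := seq1.drop (seq1.length - (kk + 1)) with hP
    have hPlen : P.length = kk + 1 := by rw [hP, List.length_drop, hlen1]; omega
    congr 1
    -- take need of flatten (replicate reps P) = extSeq P need
    have hneed : 0 ≤ length - (seq1.length : Int) := by rw [hlen1]; omega
    set need := length - (seq1.length : Int) with hneedd
    have hdivpos : (0 : Int) < (P.length : Int) := by rw [hPlen]; push_cast; omega
    rw [PySem.Int.floordiv_eq_ediv_of_pos hdivpos]
    set reps := need / (P.length : Int) + 1 with hreps
    have hrpos : 0 < reps := by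
      have := Int.ediv_nonneg hneed (le_of_lt hdivpos); omega
    have hbound : need < reps * (P.length : Int) :=
      Int.lt_ediv_add_one_mul_self need hdivpos
    have hboundN : need.toNat ≤ reps.toNat * P.length := by
      have hc : ((reps.toNat * P.length : Nat) : Int) = reps * (P.length : Int) := by
        push_cast; rw [Int.toNat_of_nonneg (le_of_lt hrpos)]
      omega
    rw [flatten_replicate_eq_extSeq P reps.toNat, extSeq_take P _ _ hboundN]
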